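-- pv_equiv track=rewrite | github.com/burakyalcin10/echo-chamber-ai | backend/services/embedding_matcher.py | _keyword_match
-- ===== SOURCE A (Python) =====
-- from typing import Any
--
-- def _keyword_match(user_text: str, covers: list[dict[str, Any]]) -> dict[str, Any]:
--     words = {word.strip(".,;:!?()[]{}\"'").lower() for word in user_text.split()}
--     best_cover = covers[0]
--     best_score = -1
--     for cover in covers:
--         haystack = " ".join(
--             str(cover.get(field, ""))
--             for field in ("artist", "genre", "mood_hint", "context_notes")
--         ).lower()
--         score = sum(1 for word in words if word and word in haystack)
--         if score > best_score:
--             best_cover = cover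
--             best_score = score
--     return best_cover
-- ===== SOURCE B (Python) =====
-- _FIELDS = ("artist", "genre", "mood_hint", "context_notes")
-- _PUNCT = ".,;:!?()[]{}\"'"
--
-- def _keyword_match(user_text: str, covers: list) -> dict:
--     # Score by set intersection: build, per cover, the set of all haystack
--     # substrings whose length matches some keyword, then the score is the
--     # size of its intersection with the keyword set; pick with max(key=...).
--     words = {w.strip(_PUNCT).lower() for w in user_text.split()} - {""}
--     lens = {len(w) for w in words}
--
--     def score(cover):
--         hay = " ".join(str(cover.get(f, "")) for f in _FIELDS).lower()
--         grams = {hay[i:i + L] for L in lens for i in range(len(hay) - L + 1)}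
--         return len(words & grams)
--
--     return max(covers, key=score)
-- ===== Notes on version B (the rewrite author's own statement) =====
-- stated objective: alternative
-- what changed: scoring no longer runs a per-keyword substring scan with a hand-rolled running best: B precomputes, per cover, the set of all haystack substrings whose length matches some keyword, scores by set intersection with the keyword set, and selects the winner with Python's max(key=...)
import Mathlib
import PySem

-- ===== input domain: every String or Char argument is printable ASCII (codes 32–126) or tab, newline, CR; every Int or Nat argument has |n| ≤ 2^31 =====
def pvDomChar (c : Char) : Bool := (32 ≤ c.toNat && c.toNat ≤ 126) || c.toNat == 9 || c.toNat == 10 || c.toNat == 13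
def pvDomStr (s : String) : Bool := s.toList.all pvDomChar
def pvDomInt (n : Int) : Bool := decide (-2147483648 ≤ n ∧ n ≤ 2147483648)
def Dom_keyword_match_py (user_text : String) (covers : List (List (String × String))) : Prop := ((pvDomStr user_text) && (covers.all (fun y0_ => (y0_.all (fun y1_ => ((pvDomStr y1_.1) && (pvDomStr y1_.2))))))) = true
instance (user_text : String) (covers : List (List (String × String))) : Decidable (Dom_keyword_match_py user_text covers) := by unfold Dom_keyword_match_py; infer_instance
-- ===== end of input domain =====

-- B scores each cover by intersecting the keyword set with a precomputed set of the
-- haystack's substrings (of the keyword lengths) and picks the winner with max(key=…),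
-- instead of A's per-keyword substring scans with a hand-rolled running best; alternative structure, same cost class.

-- ===== PORT A =====
-- the field tuple and the strip-character set, shared verbatim by both Pythons
def kmFields : List String := ["artist", "genre", "mood_hint", "context_notes"]
def kmPunct : String := ".,;:!?()[]{}\"'"
-- '" ".join(str(cover.get(f, "")) for f in FIELDS).lower()' (identical line in A and B)
def kmHaystack (cover : List (String × String)) : String :=
  PySem.Str.lower (PySem.Str.join " " (kmFields.map (fun f => PySem.Dict.getD ⟨cover⟩ f "")))
-- '{w.strip(PUNCT).lower() for w in user_text.split()}' (identical in A and B)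
def kmWords (t : String) : PySem.Set String :=
  PySem.Set.ofList ((PySem.Str.split₀ t).map (fun w => PySem.Str.lower (PySem.Str.stripChars w kmPunct)))

def keyword_match_py (user_text : String) (covers : List (List (String × String))) : List (String × String) :=
  let words := kmWords user_text
  (covers.foldl
    (fun (st : List (String × String) × Int) cover =>
      let haystack := kmHaystack cover
      let score : Int :=
        ((words.map (fun w => if (w != "" && PySem.Str.isIn w haystack) then (1 : Int) else 0)).sum)
      if st.2 < score then (cover, score) else st)
    (covers.headD [], -1)).1

-- ===== PORT B =====
-- '{hay[i:i+L] for L in lens for i in range(len(hay)-L+1)}'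
def kmGrams (lens : PySem.Set Int) (hay : String) : PySem.Set String :=
  PySem.Set.ofList (lens.flatMap (fun L =>
    (PySem.List.pyRange 0 (PySem.Str.len hay - L + 1) 1).map
      (fun i => PySem.Str.slice hay (some i) (some (i + L)))))

-- B's 'score(cover)': len(words & grams) over the substring set
def kmScoreB (words : PySem.Set String) (lens : PySem.Set Int)
    (cover : List (String × String)) : Int :=
  PySem.Set.len (PySem.Set.inter words (kmGrams lens (kmHaystack cover)))

def keyword_match_py_alt (user_text : String) (covers : List (List (String × String))) : List (String × String) :=
  let words := PySem.Set.diff (kmWords user_text) [""]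
  let lens : PySem.Set Int := PySem.Set.ofList (words.map (fun w => PySem.Str.len w))
  match PySem.List.max? covers (fun c => kmScoreB words lens c) with
  | some c => c
  | none => []    -- unreachable under Pre_ (Python max raises ValueError on an empty sequence)

-- ===== PRECONDITION & SPEC =====
-- Python A evaluates covers[0], which raises IndexError iff covers is empty; Pre_ excludes exactly that.
def Pre_keyword_match_py (user_text : String) (covers : List (List (String × String))) : Prop :=
  covers ≠ []
instance (user_text : String) (covers : List (List (String × String))) : Decidable (Pre_keyword_match_py user_text covers) := by unfold Pre_keyword_match_py; infer_instance
def pvWitness_keyword_match_py : String × (List (List (String × String))) :=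
  ("Some jazz mood.", [[("artist", "Miles"), ("genre", "Jazz")], [("genre", "rock")]])

def Spec_keyword_match_py (user_text : String) (covers : List (List (String × String))) (out : List (String × String)) : Prop := out = keyword_match_py_alt user_text covers
instance (user_text : String) (covers : List (List (String × String))) (out : List (String × String)) : Decidable (Spec_keyword_match_py user_text covers out) := by unfold Spec_keyword_match_py; infer_instance

-- ===== CLAIM (what is proved, stated in full; the proofs are below) =====
def Claim_equal_keyword_match_py : Prop := ∀ (user_text : String) (covers : List (List (String × String))), Dom_keyword_match_py user_text covers → Pre_keyword_match_py user_text covers → Spec_keyword_match_py user_text covers (keyword_match_py user_text covers)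

-- ===== LEMMAS AND PROOFS =====

-- the per-cover score both programs compute, as a countP over B's filtered word set
def kmScore (ws : List String) (cover : List (String × String)) : Int :=
  (ws.countP (fun w => PySem.Str.isIn w (kmHaystack cover)) : Int)

-- the abstract "keep the strictly better cover" fold both results reduce to
def kmPick (ws : List String) (st : List (String × String) × Int)
    (l : List (List (String × String))) : List (String × String) × Int :=
  l.foldl (fun st c => if st.2 < kmScore ws c then (c, kmScore ws c) else st) st

lemma kmScore_nonneg (ws : List String) (c : List (String × String)) : 0 ≤ kmScore ws c := by
  simp [kmScore]

-- A's guarded generator-sum over the raw word set is the countP over B's filtered word set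
lemma scoreA_eq (ws : List String) (c : List (String × String)) :
    ((ws.map (fun w => if (w != "" && PySem.Str.isIn w (kmHaystack c)) then (1 : Int) else 0)).sum)
      = kmScore (PySem.Set.diff ws [""]) c := by
  rw [PySem.List.sum_map_ite_one_zero]
  unfold kmScore
  have hnat : List.countP (fun w => PySem.Str.isIn w (kmHaystack c)) (PySem.Set.diff ws [""])
      = List.countP (fun w => w != "" && PySem.Str.isIn w (kmHaystack c)) ws := by
    simp [PySem.Set.diff, List.countP_filter, Bool.and_comm]
    exact (List.countP_congr (fun a _ => by simp [bne])).symm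
  rw [hnat]

-- A's fold on c :: cs, once the init has absorbed the first cover, is kmPick
lemma A_eq (u : String) (c : List (String × String)) (cs : List (List (String × String))) :
    keyword_match_py u (c :: cs)
      = (kmPick (PySem.Set.diff (kmWords u) [""])
          ((c, kmScore (PySem.Set.diff (kmWords u) [""]) c) : List (String × String) × Int) cs).1 := by
  unfold keyword_match_py
  simp only [List.headD_cons, List.foldl_cons]
  rw [scoreA_eq (kmWords u) c]
  rw [if_pos (lt_of_lt_of_le (by norm_num) (kmScore_nonneg _ c))]
  unfold kmPick
  simp only [scoreA_eq]

-- a slice hay[i:i+L] (0 ≤ i, 0 ≤ L) is an infix of hay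
lemma slice_isInfix (hay : String) (i L : Int) (hi : 0 ≤ i) (hL : 0 ≤ L) :
    (PySem.Str.slice hay (some i) (some (i + L))).toList <:+: hay.toList := by
  obtain ⟨a, rfl⟩ : ∃ a : Nat, i = (a : Int) := ⟨i.toNat, (Int.toNat_of_nonneg hi).symm⟩
  obtain ⟨b, rfl⟩ : ∃ b : Nat, L = (b : Int) := ⟨L.toNat, (Int.toNat_of_nonneg hL).symm⟩
  rw [PySem.Str.toList_slice, PySem.Chars.slice_eq_listSlice, PySem.List.slice_natCast_add]
  exact ((List.take_prefix b (hay.toList.drop a)).isInfix).trans ((List.drop_suffix a hay.toList).isInfix)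

-- membership in B's substring set is exactly Python's 'w in hay', for any w whose length is in lens
lemma kmGrams_contains (lens : PySem.Set Int) (hay w : String)
    (hlen : ∀ L ∈ lens, 0 ≤ L) (hw : PySem.Str.len w ∈ lens) :
    PySem.Set.contains (kmGrams lens hay) w = PySem.Str.isIn w hay := by
  rw [Bool.eq_iff_iff, PySem.Set.contains_iff, PySem.Str.isIn_iff_infix]
  unfold kmGrams
  rw [PySem.Set.mem_ofList, List.mem_flatMap]
  constructor
  · rintro ⟨L, hL, hmem⟩
    rw [List.mem_map] at hmem
    obtain ⟨i, hi, rfl⟩ := hmem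
    rw [PySem.List.mem_pyRange_one] at hi
    exact slice_isInfix hay i L hi.1 (hlen L hL)
  · rintro ⟨s, t, hst⟩
    refine ⟨PySem.Str.len w, hw, ?_⟩
    rw [List.mem_map]
    refine ⟨(s.length : Int), ?_, ?_⟩
    · rw [PySem.List.mem_pyRange_one]
      constructor
      · exact_mod_cast Nat.zero_le _
      · rw [PySem.Str.len_eq, PySem.Str.len_eq]
        have : hay.toList.length = s.length + w.toList.length + t.length := by
          rw [← hst]; simp; omega
        omega
    · apply String.toList_inj.mp
      rw [PySem.Str.len_eq, PySem.Str.toList_slice, PySem.Chars.slice_eq_listSlice]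
      rw [PySem.List.slice_natCast_add]
      have h1 : hay.toList = s ++ (w.toList ++ t) := by rw [← hst]; simp
      rw [h1, List.drop_left, List.take_left]

-- every element of B's lens set is a (nonnegative) word length
lemma kmLens_nonneg (ws : List String) :
    ∀ L ∈ PySem.Set.ofList (ws.map (fun w => PySem.Str.len w)), 0 ≤ L := by
  intro L hL
  rw [PySem.Set.mem_ofList, List.mem_map] at hL
  obtain ⟨w, _, rfl⟩ := hL
  rw [PySem.Str.len_eq]
  exact_mod_cast Nat.zero_le _

-- B's set-intersection score is the countP score
lemma scoreB_eq (ws : List String) (c : List (String × String)) :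
    kmScoreB ws (PySem.Set.ofList (ws.map (fun w => PySem.Str.len w))) c = kmScore ws c := by
  simp only [kmScoreB, kmScore, PySem.Set.len, PySem.Set.inter]
  have h : List.countP (fun x => PySem.Set.contains (kmGrams (PySem.Set.ofList (ws.map (fun w => PySem.Str.len w))) (kmHaystack c)) x) ws
      = List.countP (fun w => PySem.Str.isIn w (kmHaystack c)) ws := by
    refine List.countP_congr (fun w hwmem => ?_)
    rw [kmGrams_contains _ _ _ (kmLens_nonneg ws)
      (by rw [PySem.Set.mem_ofList, List.mem_map]; exact ⟨w, hwmem, rfl⟩)]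
  rw [← List.countP_eq_length_filter, h]

-- Python's max(xs, key=…) on c :: cs is the plain strictly-greater fold from c
lemma max?_cons_fold {α κ : Type} [LinearOrder κ] (key : α → κ) (c : α) (cs : List α) :
    PySem.List.max? (c :: cs) key
      = some (cs.foldl (fun m x => if key m < key x then x else m) c) := by
  show List.foldl _ (some c) cs = _
  induction cs generalizing c with
  | nil => rfl
  | cons x cs ih =>
    rw [List.foldl_cons, List.foldl_cons]
    show List.foldl _ (if key c < key x then some x else some c) cs
      = some (List.foldl _ (if key c < key x then x else c) cs)
    by_cases h : key c < key x
    · rw [if_pos h, if_pos h, ih]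
    · rw [if_neg h, if_neg h, ih]

-- kmPick carries the invariant 'second component = score of first', so it is the plain fold
lemma kmPick_fst (ws : List String) (cs : List (List (String × String))) :
    ∀ m : List (String × String),
      (kmPick ws (m, kmScore ws m) cs).1
        = cs.foldl (fun m x => if kmScore ws m < kmScore ws x then x else m) m := by
  induction cs with
  | nil => intro m; rfl
  | cons x cs ih =>
    intro m
    unfold kmPick
    simp only [List.foldl_cons]
    by_cases h : kmScore ws m < kmScore ws x
    · rw [if_pos h, if_pos h]; exact ih x
    · rw [if_neg h, if_neg h]; exact ih m

lemma B_eq (u : String) (c : List (String × String)) (cs : List (List (String × String))) :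
    keyword_match_py_alt u (c :: cs)
      = (kmPick (PySem.Set.diff (kmWords u) [""])
          ((c, kmScore (PySem.Set.diff (kmWords u) [""]) c) : List (String × String) × Int) cs).1 := by
  simp only [keyword_match_py_alt, max?_cons_fold]
  rw [kmPick_fst]
  congr 1
  funext m x
  rw [scoreB_eq, scoreB_eq]

-- ===== VERDICT (by name: the statement is the Claim_ definition above) =====
theorem keyword_match_py_spec : Claim_equal_keyword_match_py := by
  intro u covers _ hpre
  cases covers with
  | nil => exact absurd rfl hpre
  | cons c cs =>
    unfold Spec_keyword_match_py
    rw [A_eq, B_eq]
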